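-- pv_equiv track=rewrite | github.com/xiaoqian2006/xiaofenjun | scripts/install_personal_plugin.py | upsert_codex_hooks_flag
-- ===== SOURCE A (Python) =====
-- def upsert_codex_hooks_flag(text: str) -> str:
--     lines = text.splitlines()
--     if not lines:
--         return "[features]\ncodex_hooks = true\n"
--
--     features_start = None
--     for idx, line in enumerate(lines):
--         if line.strip() == "[features]":
--             features_start = idx
--             break
--
--     if features_start is None:
--         if text and not text.endswith("\n"):
--             text += "\n"
--         return text + "\n[features]\ncodex_hooks = true\n"
--
--     section_end = len(lines)
--     for idx in range(features_start + 1, len(lines)):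
--         stripped = lines[idx].strip()
--         if stripped.startswith("[") and stripped.endswith("]"):
--             section_end = idx
--             break
--
--     for idx in range(features_start + 1, section_end):
--         stripped = lines[idx].strip()
--         if stripped.startswith("codex_hooks"):
--             lines[idx] = "codex_hooks = true"
--             return "\n".join(lines) + "\n"
--
--     lines.insert(section_end, "codex_hooks = true")
--     return "\n".join(lines) + "\n"
-- ===== SOURCE B (Python) =====
-- def upsert_codex_hooks_flag(text: str) -> str:
--     lines = text.splitlines()
--     if not lines:
--         return "[features]\ncodex_hooks = true\n"
--
--     out = []
--     in_features = False
--     seen = False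
--     for line in lines:
--         stripped = line.strip()
--         if in_features:
--             if stripped.startswith("[") and stripped.endswith("]"):
--                 out.append("codex_hooks = true")
--                 out.append(line)
--                 in_features = False
--             elif stripped.startswith("codex_hooks"):
--                 out.append("codex_hooks = true")
--                 in_features = False
--             else:
--                 out.append(line)
--         else:
--             out.append(line)
--             if not seen and stripped == "[features]":
--                 in_features = True
--                 seen = True
--
--     if not seen:
--         if not text.endswith("\n"):
--             text += "\n"
--         return text + "\n[features]\ncodex_hooks = true\n"
--     if in_features:
--         out.append("codex_hooks = true")
--     return "\n".join(out) + "\n"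
-- ===== Notes on version B (the rewrite author's own statement) =====
-- stated objective: alternative
-- what changed: A locates the [features] section with three separate index-based scans (find section start, find section end, find the codex_hooks line) and then patches the line list by index; B is a single streaming pass over the lines carrying in_features/seen state flags that replaces or inserts the flag line as it copies.
import Mathlib
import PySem

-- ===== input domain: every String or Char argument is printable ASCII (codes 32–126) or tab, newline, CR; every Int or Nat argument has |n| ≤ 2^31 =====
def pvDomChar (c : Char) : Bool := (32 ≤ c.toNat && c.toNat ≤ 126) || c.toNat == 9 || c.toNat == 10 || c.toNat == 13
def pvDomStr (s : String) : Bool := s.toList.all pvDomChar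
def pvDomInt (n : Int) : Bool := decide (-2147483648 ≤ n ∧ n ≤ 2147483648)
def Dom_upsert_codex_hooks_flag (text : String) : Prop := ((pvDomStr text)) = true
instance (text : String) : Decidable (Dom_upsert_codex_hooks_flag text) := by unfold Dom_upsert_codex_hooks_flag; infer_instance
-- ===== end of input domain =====

-- B re-implements A's index-based scan-and-patch as a single streaming pass with state flags
-- (same return value everywhere; same cost; objective: alternative decomposition).

-- shared string literals (as char lists; both Pythons use the same literals)
def pvFeat : List Char := "[features]".toList
def pvFlag : List Char := "codex_hooks = true".toList
def pvCodex : List Char := "codex_hooks".toList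
def pvTail : List Char := "\n[features]\ncodex_hooks = true\n".toList

-- ===== PORT A =====
-- first loop of A: find index of first line whose strip == "[features]"
def aFindFeat : List (List Char) → Nat → Option Nat
  | [], _ => none
  | l :: ls, i =>
    if PySem.Chars.strip l = pvFeat then some i else aFindFeat ls (i + 1)

-- second loop of A: first header line at index ≥ i (scans lines.drop i with absolute counter)
def aFindHeader : List (List Char) → Nat → Option Nat
  | [], _ => none
  | l :: ls, i =>
    if PySem.Chars.startswith (PySem.Chars.strip l) ['['] &&
        PySem.Chars.endswith (PySem.Chars.strip l) [']'] then some i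
    else aFindHeader ls (i + 1)

-- third loop of A: first codex_hooks line at index in [i, stop)
def aFindCodex : List (List Char) → Nat → Nat → Option Nat
  | [], _, _ => none
  | l :: ls, i, stop =>
    if stop ≤ i then none
    else if PySem.Chars.startswith (PySem.Chars.strip l) pvCodex then some i
    else aFindCodex ls (i + 1) stop

def upsert_codex_hooks_flag (text : String) : String :=
  let lines := PySem.Chars.splitlines text.toList
  if lines = [] then "[features]\ncodex_hooks = true\n"
  else
    match aFindFeat lines 0 with
    | none =>
      let cs := text.toList
      let cs := if cs ≠ [] ∧ ¬ (PySem.Chars.endswith cs ['\n']) then cs ++ ['\n'] else cs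
      String.ofList (cs ++ pvTail)
    | some fs =>
      let sectionEnd :=
        match aFindHeader (lines.drop (fs + 1)) (fs + 1) with
        | some k => k
        | none => lines.length
      match aFindCodex (lines.drop (fs + 1)) (fs + 1) sectionEnd with
      | some j => String.ofList (PySem.Chars.join ['\n'] (lines.set j pvFlag) ++ ['\n'])
      | none =>
        String.ofList
          (PySem.Chars.join ['\n'] (PySem.List.insert lines (sectionEnd : Int) pvFlag) ++ ['\n'])

-- ===== PORT B =====
-- B's single pass: state (out, in_features, seen)
def bLoop : List (List Char) → List (List Char) → Bool → Bool →
    List (List Char) × Bool × Bool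
  | [], out, inf, seen => (out, inf, seen)
  | l :: ls, out, inf, seen =>
    if inf then
      if PySem.Chars.startswith (PySem.Chars.strip l) ['['] &&
          PySem.Chars.endswith (PySem.Chars.strip l) [']'] then
        bLoop ls (out ++ [pvFlag, l]) false seen
      else if PySem.Chars.startswith (PySem.Chars.strip l) pvCodex then
        bLoop ls (out ++ [pvFlag]) false seen
      else
        bLoop ls (out ++ [l]) inf seen
    else
      if seen = false ∧ PySem.Chars.strip l = pvFeat then bLoop ls (out ++ [l]) true true
      else bLoop ls (out ++ [l]) inf seen

def upsert_codex_hooks_flag_alt (text : String) : String :=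
  let lines := PySem.Chars.splitlines text.toList
  if lines = [] then "[features]\ncodex_hooks = true\n"
  else
    match bLoop lines [] false false with
    | (out, inf, seen) =>
      if !seen then
        let cs := text.toList
        let cs := if ¬ (PySem.Chars.endswith cs ['\n']) then cs ++ ['\n'] else cs
        String.ofList (cs ++ pvTail)
      else
        let out := if inf then out ++ [pvFlag] else out
        String.ofList (PySem.Chars.join ['\n'] out ++ ['\n'])

-- ===== PRECONDITION & SPEC =====
def Spec_upsert_codex_hooks_flag (text : String) (out : String) : Prop := out = upsert_codex_hooks_flag_alt text
instance (text : String) (out : String) : Decidable (Spec_upsert_codex_hooks_flag text out) := by unfold Spec_upsert_codex_hooks_flag; infer_instance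

-- ===== CLAIM (what is proved, stated in full; the proofs are below) =====
def Claim_equal_upsert_codex_hooks_flag : Prop := ∀ (text : String), Dom_upsert_codex_hooks_flag text → Spec_upsert_codex_hooks_flag text (upsert_codex_hooks_flag text)

-- ===== LEMMAS AND PROOFS =====

theorem aFindFeat_none {ls : List (List Char)} {i : Nat} (h : aFindFeat ls i = none) :
    ∀ l ∈ ls, PySem.Chars.strip l ≠ pvFeat := by
  induction ls generalizing i with
  | nil => simp
  | cons l ls ih =>
    simp only [aFindFeat] at h
    split at h
    · exact absurd h (by simp)
    · intro x hx
      rcases List.mem_cons.mp hx with hx | hx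
      · simpa [hx] using ‹¬ _›
      · exact ih h x hx

theorem aFindFeat_some {ls : List (List Char)} {i fs : Nat} (h : aFindFeat ls i = some fs) :
    ∃ pre f rest, ls = pre ++ f :: rest ∧ i + pre.length = fs ∧
      (∀ l ∈ pre, PySem.Chars.strip l ≠ pvFeat) ∧ PySem.Chars.strip f = pvFeat := by
  induction ls generalizing i with
  | nil => simp [aFindFeat] at h
  | cons l ls ih =>
    simp only [aFindFeat] at h
    split at h
    · refine ⟨[], l, ls, by simp, ?_, by simp, ‹_›⟩
      cases h; simp
    · obtain ⟨pre, f, rest, h1, h2, h3, h4⟩ := ih h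
      refine ⟨l :: pre, f, rest, by simp [h1], by simp only [List.length_cons]; omega, ?_, h4⟩
      intro x hx
      rcases List.mem_cons.mp hx with hx | hx
      · simpa [hx] using ‹¬ _›
      · exact h3 x hx

theorem aFindHeader_bounds {ls : List (List Char)} {i k : Nat} (h : aFindHeader ls i = some k) :
    i ≤ k ∧ k < i + ls.length := by
  induction ls generalizing i with
  | nil => simp [aFindHeader] at h
  | cons l ls ih =>
    simp only [aFindHeader] at h
    split at h
    · cases h; simp only [List.length_cons]; omega
    · have := ih h; simp only [List.length_cons]; omega

theorem aFindCodex_ge {ls : List (List Char)} {i stop j : Nat} (h : aFindCodex ls i stop = some j) :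
    i ≤ j := by
  induction ls generalizing i with
  | nil => simp [aFindCodex] at h
  | cons l ls ih =>
    simp only [aFindCodex] at h
    split at h
    · exact absurd h (by simp)
    · split at h
      · cases h; omega
      · have := ih h; omega

-- once seen and out of the section, B just copies
theorem bLoop_copy (ls : List (List Char)) (out : List (List Char)) :
    bLoop ls out false true = (out ++ ls, false, true) := by
  induction ls generalizing out with
  | nil => simp [bLoop]
  | cons l ls ih => simp [bLoop, ih]

-- before the first [features] line, B just copies
theorem bLoop_skip {pre : List (List Char)} (hpre : ∀ l ∈ pre, PySem.Chars.strip l ≠ pvFeat)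
    (ls out : List (List Char)) :
    bLoop (pre ++ ls) out false false = bLoop ls (out ++ pre) false false := by
  induction pre generalizing out with
  | nil => simp
  | cons p pre ih =>
    have hp : PySem.Chars.strip p ≠ pvFeat := hpre p (by simp)
    simp only [List.cons_append, bLoop, hp, decide_eq_true_eq, Bool.true_and]
    rw [if_neg (by simpa using hp)]
    simpa [List.append_assoc] using ih (fun l hl => hpre l (by simp [hl])) (out ++ [p])

-- A's section_end as a function (proof-side abbreviation for A's match)
def aSE (ls : List (List Char)) (i : Nat) : Nat :=
  match aFindHeader ls i with | some k => k | none => i + ls.length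

theorem aSE_lb (ls : List (List Char)) (i : Nat) : i ≤ aSE ls i := by
  unfold aSE
  cases hk : aFindHeader ls i with
  | none => show i ≤ i + ls.length; omega
  | some k => exact (aFindHeader_bounds hk).1

theorem aSE_ub (ls : List (List Char)) (i : Nat) : aSE ls i ≤ i + ls.length := by
  unfold aSE
  cases hk : aFindHeader ls i with
  | none => show i + ls.length ≤ i + ls.length; omega
  | some k => show k ≤ i + ls.length; have := (aFindHeader_bounds hk).2; omega

theorem aSE_cons_of_header {l : List Char} (ls : List (List Char)) (i : Nat)
    (hh : (PySem.Chars.startswith (PySem.Chars.strip l) ['['] &&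
      PySem.Chars.endswith (PySem.Chars.strip l) [']']) = true) :
    aSE (l :: ls) i = i := by
  simp [aSE, aFindHeader, hh]

theorem aSE_cons_of_not_header {l : List Char} (ls : List (List Char)) (i : Nat)
    (hh : ¬ (PySem.Chars.startswith (PySem.Chars.strip l) ['['] &&
      PySem.Chars.endswith (PySem.Chars.strip l) [']']) = true) :
    aSE (l :: ls) i = aSE ls (i + 1) := by
  simp only [aSE, aFindHeader, if_neg hh]
  cases aFindHeader ls (i + 1) with
  | none => show i + (l :: ls).length = i + 1 + ls.length; simp only [List.length_cons]; omega
  | some k => rfl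

-- the heart: inside the section, A's two index scans compute exactly B's stream
theorem inner_eq : ∀ (rest out : List (List Char)) (i : Nat),
    (match aFindCodex rest i (aSE rest i) with
     | some j => out ++ rest.set (j - i) pvFlag
     | none => out ++ rest.take (aSE rest i - i) ++ pvFlag :: rest.drop (aSE rest i - i)) =
    (match bLoop rest out true true with
     | (o, inf, _) => if inf then o ++ [pvFlag] else o) := by
  intro rest
  induction rest with
  | nil => intro out i; simp [aSE, aFindHeader, aFindCodex, bLoop]
  | cons l ls ih =>
    intro out i
    by_cases hh : (PySem.Chars.startswith (PySem.Chars.strip l) ['['] &&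
        PySem.Chars.endswith (PySem.Chars.strip l) [']']) = true
    · -- header line: A inserts right here, B emits the flag and copies the remainder
      rw [aSE_cons_of_header ls i hh]
      rw [show aFindCodex (l :: ls) i i = none from by simp [aFindCodex]]
      rw [show bLoop (l :: ls) out true true = bLoop ls (out ++ [pvFlag, l]) false true from by
        simp [bLoop, hh]]
      rw [bLoop_copy]
      simp
    · -- not a header line
      rw [aSE_cons_of_not_header ls i hh]
      have hlt : i < aSE ls (i + 1) := by have := aSE_lb ls (i + 1); omega
      by_cases hc : PySem.Chars.startswith (PySem.Chars.strip l) pvCodex = true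
      · -- first codex_hooks line: A patches index i, B replaces it in the stream
        rw [show aFindCodex (l :: ls) i (aSE ls (i + 1)) = some i from by
          simp [aFindCodex, hc, show ¬ aSE ls (i + 1) ≤ i from by omega]]
        rw [show bLoop (l :: ls) out true true = bLoop ls (out ++ [pvFlag]) false true from by
          simp [bLoop, hh, hc]]
        rw [bLoop_copy]
        simp
      · -- plain line: both sides shift by one
        rw [show aFindCodex (l :: ls) i (aSE ls (i + 1)) = aFindCodex ls (i + 1) (aSE ls (i + 1)) from by
          simp [aFindCodex, hc, show ¬ aSE ls (i + 1) ≤ i from by omega]]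
        rw [show bLoop (l :: ls) out true true = bLoop ls (out ++ [l]) true true from by
          simp [bLoop, hh, hc]]
        have key := ih (out ++ [l]) (i + 1)
        cases hcx : aFindCodex ls (i + 1) (aSE ls (i + 1)) with
        | some j =>
          have hj : i + 1 ≤ j := aFindCodex_ge hcx
          simp only [hcx] at key ⊢
          have hset : (l :: ls).set (j - i) pvFlag = l :: ls.set (j - (i + 1)) pvFlag := by
            have : j - i = (j - (i + 1)) + 1 := by omega
            simp [this]
          rw [hset]
          simpa [List.append_assoc] using key
        | none =>
          simp only [hcx] at key ⊢
          have h1 : i + 1 ≤ aSE ls (i + 1) := aSE_lb ls (i + 1)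
          have hstep : aSE ls (i + 1) - i = (aSE ls (i + 1) - (i + 1)) + 1 := by omega
          rw [show (l :: ls).take (aSE ls (i + 1) - i) = l :: ls.take (aSE ls (i + 1) - (i + 1)) from by
            rw [hstep]; rfl]
          rw [show (l :: ls).drop (aSE ls (i + 1) - i) = ls.drop (aSE ls (i + 1) - (i + 1)) from by
            rw [hstep]; rfl]
          simpa [List.append_assoc] using key

theorem set_append_right (xs ys : List (List Char)) (n : Nat) (v : List Char) :
    (xs ++ ys).set (xs.length + n) v = xs ++ ys.set n v := by
  simp

theorem take_append_right (xs ys : List (List Char)) (n : Nat) :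
    (xs ++ ys).take (xs.length + n) = xs ++ ys.take n := by
  simp [List.take_append]

theorem drop_append_right (xs ys : List (List Char)) (n : Nat) :
    (xs ++ ys).drop (xs.length + n) = ys.drop n := by
  simp

theorem upsert_codex_hooks_flag_eq (text : String) :
    upsert_codex_hooks_flag text = upsert_codex_hooks_flag_alt text := by
  unfold upsert_codex_hooks_flag upsert_codex_hooks_flag_alt
  by_cases hnil : PySem.Chars.splitlines text.toList = []
  · simp [hnil]
  · simp only [hnil, if_false]
    cases hff : aFindFeat (PySem.Chars.splitlines text.toList) 0 with
    | none =>
      -- no [features] section: B never sets seen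
      have hall := aFindFeat_none hff
      have hb := bLoop_skip hall [] []
      simp only [List.append_nil, List.nil_append] at hb
      rw [bLoop] at hb
      simp only [hb, Bool.not_false, if_pos]
      have hcs : text.toList ≠ [] := by
        intro h; apply hnil; rw [h]; rfl
      simp [hcs]
    | some fs =>
      obtain ⟨pre, f, rest, hls, hfs, hpre, hf⟩ := aFindFeat_some hff
      have hfs' : fs = pre.length := by omega
      subst hfs'
      have hdrop : (PySem.Chars.splitlines text.toList).drop (pre.length + 1) = rest := by
        rw [hls]
        simp [List.drop_append]
      have hlen : (PySem.Chars.splitlines text.toList).length = pre.length + 1 + rest.length := by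
        rw [hls]; simp; omega
      -- B's loop: copy pre, enter the section at f, then stream through rest
      have hb : bLoop (PySem.Chars.splitlines text.toList) [] false false =
          bLoop rest (pre ++ [f]) true true := by
        rw [hls, bLoop_skip hpre]
        simp [bLoop, hf]
      have hseen : ∀ (rs o : List (List Char)), (bLoop rs o true true).2.2 = true := by
        intro rs
        induction rs with
        | nil => intro o; simp [bLoop]
        | cons l' ls' ih' =>
          intro o
          by_cases hh : (PySem.Chars.startswith (PySem.Chars.strip l') ['['] &&
              PySem.Chars.endswith (PySem.Chars.strip l') [']']) = true
          · rw [show bLoop (l' :: ls') o true true =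
                bLoop ls' (o ++ [pvFlag, l']) false true from by simp [bLoop, hh]]
            simp [bLoop_copy]
          · by_cases hc : PySem.Chars.startswith (PySem.Chars.strip l') pvCodex = true
            · rw [show bLoop (l' :: ls') o true true =
                  bLoop ls' (o ++ [pvFlag]) false true from by simp [bLoop, hh, hc]]
              simp [bLoop_copy]
            · rw [show bLoop (l' :: ls') o true true =
                  bLoop ls' (o ++ [l']) true true from by simp [bLoop, hh, hc]]
              exact ih' _
      have key := inner_eq rest (pre ++ [f]) (pre.length + 1)
      simp only [hdrop, hlen]
      have hmatch : (match aFindHeader rest (pre.length + 1) with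
          | some k => k | none => pre.length + 1 + rest.length) = aSE rest (pre.length + 1) := rfl
      rw [hmatch, hb]
      rcases hbl : bLoop rest (pre ++ [f]) true true with ⟨o, inf, sn⟩
      have hsn : sn = true := by
        have := hseen rest (pre ++ [f]); rw [hbl] at this; exact this
      subst hsn
      simp only [Bool.not_true, Bool.false_eq_true, if_false]
      rw [hbl] at key
      cases hcx : aFindCodex rest (pre.length + 1) (aSE rest (pre.length + 1)) with
      | some j =>
        have hj : pre.length + 1 ≤ j := aFindCodex_ge hcx
        simp only [hcx] at key
        have hset : (PySem.Chars.splitlines text.toList).set j pvFlag =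
            pre ++ f :: rest.set (j - (pre.length + 1)) pvFlag := by
          rw [hls]
          have hj' : j = pre.length + (j - (pre.length + 1) + 1) := by omega
          rw [hj', set_append_right]
          have : pre.length + (j - (pre.length + 1) + 1) - (pre.length + 1) = j - (pre.length + 1) := by
            omega
          rw [this, List.set_cons_succ]
        show String.ofList (PySem.Chars.join ['\n']
              ((PySem.Chars.splitlines text.toList).set j pvFlag) ++ ['\n']) =
          String.ofList (PySem.Chars.join ['\n'] (if inf = true then o ++ [pvFlag] else o) ++ ['\n'])
        rw [hset, show pre ++ f :: rest.set (j - (pre.length + 1)) pvFlag =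
            pre ++ [f] ++ rest.set (j - (pre.length + 1)) pvFlag from by simp, key]
      | none =>
        simp only [hcx] at key
        have h1 : pre.length + 1 ≤ aSE rest (pre.length + 1) := aSE_lb rest (pre.length + 1)
        have h2 : aSE rest (pre.length + 1) ≤ pre.length + 1 + rest.length := aSE_ub rest (pre.length + 1)
        obtain ⟨k, hk⟩ : ∃ k, aSE rest (pre.length + 1) = pre.length + 1 + k :=
          ⟨aSE rest (pre.length + 1) - (pre.length + 1), by omega⟩
        have hkr : k ≤ rest.length := by omega
        rw [hk] at key ⊢
        rw [show pre.length + 1 + k - (pre.length + 1) = k from by omega] at key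
        show String.ofList (PySem.Chars.join ['\n']
              (PySem.List.insert (PySem.Chars.splitlines text.toList)
                ((pre.length + 1 + k : Nat) : Int) pvFlag) ++ ['\n']) =
          String.ofList (PySem.Chars.join ['\n'] (if inf = true then o ++ [pvFlag] else o) ++ ['\n'])
        have hins : PySem.List.insert (PySem.Chars.splitlines text.toList)
              ((pre.length + 1 + k : Nat) : Int) pvFlag =
            ((pre ++ [f]) ++ rest.take k) ++ pvFlag :: rest.drop k := by
          rw [PySem.List.insert_natCast _ _ _ (by rw [hlen]; omega)]
          rw [hls, show pre ++ f :: rest = (pre ++ [f]) ++ rest from by simp,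
            show pre.length + 1 + k = (pre ++ [f]).length + k from by simp,
            take_append_right, drop_append_right]
        rw [hins]
        simp only [List.append_assoc] at key ⊢
        rw [key]

-- ===== VERDICT (by name: the statement is the Claim_ definition above) =====
theorem upsert_codex_hooks_flag_spec : Claim_equal_upsert_codex_hooks_flag := by
  intro text _
  unfold Spec_upsert_codex_hooks_flag
  exact upsert_codex_hooks_flag_eq text
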